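-- pv_equiv track=rewrite | github.com/w-hc/fabric | fabric/algo/tuple_key_dict.py | compare_tuples
-- ===== SOURCE A (Python) =====
-- from typing import Tuple, Dict, Any
--
-- def compare_tuples(left: Tuple, query: Tuple):
--     assert len(left) == len(query)
--     skipped_keys = []
--     for l_k, q_k in zip(left, query):
--         if q_k is None:
--             skipped_keys.append(l_k)
--             continue
--         if l_k != q_k:
--             return False, None
--     return True, tuple(skipped_keys)
-- ===== SOURCE B (Python) =====
-- def compare_tuples(left, query):
--     assert len(left) == len(query)
--     if not left:
--         return True, ()
--     l, q = left[0], query[0]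
--     if q is None:
--         ok, rest = compare_tuples(left[1:], query[1:])
--         if not ok:
--             return False, None
--         return True, (l,) + rest
--     if l != q:
--         return False, None
--     return compare_tuples(left[1:], query[1:])
-- ===== Notes on version B (the rewrite author's own statement) =====
-- stated objective: alternative
-- what changed: Replaces A's iterative fused loop with a forward accumulator by structural recursion on the tuples: each call decides on the head pair and the skipped tuple is assembled back-to-front by prepending to the recursive result, with no accumulator or explicit loop.
import Mathlib
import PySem

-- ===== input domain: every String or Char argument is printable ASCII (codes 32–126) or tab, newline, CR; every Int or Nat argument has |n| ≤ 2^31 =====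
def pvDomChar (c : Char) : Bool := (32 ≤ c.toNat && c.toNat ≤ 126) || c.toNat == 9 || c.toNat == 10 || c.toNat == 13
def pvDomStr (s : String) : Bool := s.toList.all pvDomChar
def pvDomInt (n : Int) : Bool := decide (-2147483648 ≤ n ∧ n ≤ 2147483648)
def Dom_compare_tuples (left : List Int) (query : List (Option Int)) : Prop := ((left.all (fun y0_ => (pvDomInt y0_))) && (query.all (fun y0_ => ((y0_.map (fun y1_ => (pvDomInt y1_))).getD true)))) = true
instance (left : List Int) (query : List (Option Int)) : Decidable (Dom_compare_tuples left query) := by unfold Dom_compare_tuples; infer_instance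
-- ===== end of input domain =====

-- B replaces A's iterative fused loop (forward accumulator + early return) by
-- structural recursion on the tuples: decide on the head pair, recurse on the
-- tails, and build the skipped tuple back-to-front by prepending (objective:
-- alternative decomposition, same asymptotic cost).

-- ===== PORT A =====
-- A's single loop over zip(left, query), carrying the skipped_keys accumulator,
-- returning (False, None) at the first mismatch.
def compareTuplesLoopA (pairs : List (Int × Option Int)) (skipped : List Int) :
    Bool × Option (List Int) :=
  match pairs with
  | [] => (true, some skipped)
  | (l, q) :: rest =>
    match q with
    | none => compareTuplesLoopA rest (skipped ++ [l])
    | some v => if l ≠ v then (false, none) else compareTuplesLoopA rest skipped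

def compare_tuples (left : List Int) (query : List (Option Int)) : Bool × Option (List Int) :=
  compareTuplesLoopA (left.zip query) []

-- ===== PORT B =====
-- B's recursion on the head pair and the tails (left[0], query[0], left[1:],
-- query[1:]); when left is nonempty but query is empty B's assert fails (outside
-- Pre_), ported as an arbitrary (false, none).
def compare_tuples_alt (left : List Int) (query : List (Option Int)) : Bool × Option (List Int) :=
  match left, query with
  | [], _ => (true, some [])
  | _ :: _, [] => (false, none)
  | l :: lt, q :: qt =>
    match q with
    | none =>
      match compare_tuples_alt lt qt with
      | (ok, rest) =>
        if !ok then (false, none)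
        else (true, some (l :: rest.getD []))
    | some v => if l ≠ v then (false, none) else compare_tuples_alt lt qt

-- ===== PRECONDITION & SPEC =====
-- A's assert raises AssertionError when the lengths differ; exactly those inputs are excluded.
def Pre_compare_tuples (left : List Int) (query : List (Option Int)) : Prop :=
  left.length = query.length
instance (left : List Int) (query : List (Option Int)) : Decidable (Pre_compare_tuples left query) := by unfold Pre_compare_tuples; infer_instance

def pvWitness_compare_tuples : List Int × List (Option Int) := ([1, 2, 3], [some 1, none, some 3])

def Spec_compare_tuples (left : List Int) (query : List (Option Int)) (out : Bool × Option (List Int)) : Prop := out = compare_tuples_alt left query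
instance (left : List Int) (query : List (Option Int)) (out : Bool × Option (List Int)) : Decidable (Spec_compare_tuples left query out) := by unfold Spec_compare_tuples; infer_instance

-- ===== CLAIM (what is proved, stated in full; the proofs are below) =====
def Claim_equal_compare_tuples : Prop := ∀ (left : List Int) (query : List (Option Int)), Dom_compare_tuples left query → Pre_compare_tuples left query → Spec_compare_tuples left query (compare_tuples left query)

-- ===== LEMMAS AND PROOFS =====
-- A's loop in closed form: mismatch check plus a filter, with the accumulator out front.
lemma compareTuplesLoopA_eq (pairs : List (Int × Option Int)) (skipped : List Int) :
    compareTuplesLoopA pairs skipped =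
      (if pairs.any (fun p => match p.2 with | some v => p.1 ≠ v | none => false) then
        (false, none)
      else
        (true, some (skipped ++ pairs.filterMap (fun p => if p.2 = none then some p.1 else none)))) := by
  induction pairs generalizing skipped with
  | nil => simp [compareTuplesLoopA]
  | cons hd tl ih =>
    obtain ⟨l, q⟩ := hd
    cases q with
    | none =>
      simp only [compareTuplesLoopA, ih, List.any_cons, Bool.false_or, List.filterMap_cons]
      simp
    | some v =>
      by_cases hlv : l = v
      · subst hlv
        simp only [compareTuplesLoopA, ih, List.any_cons, List.filterMap_cons]
        rw [show (decide ¬l = l) = false by simp, Bool.false_or]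
        simp
      · simp [compareTuplesLoopA, hlv]

-- B's recursion in the same closed form (under equal lengths).
lemma compare_tuples_alt_eq (left : List Int) (query : List (Option Int))
    (h : left.length = query.length) :
    compare_tuples_alt left query =
      (if (left.zip query).any (fun p => match p.2 with | some v => p.1 ≠ v | none => false) then
        (false, none)
      else
        (true, some ((left.zip query).filterMap (fun p => if p.2 = none then some p.1 else none)))) := by
  induction left generalizing query with
  | nil =>
    cases query with
    | nil => simp [compare_tuples_alt]
    | cons q qt => simp at h
  | cons l lt ih =>
    cases query with
    | nil => simp at h
    | cons q qt =>
      have h' : lt.length = qt.length := by simpa using h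
      cases q with
      | none =>
        simp only [compare_tuples_alt, ih qt h', List.zip_cons_cons, List.any_cons,
          List.filterMap_cons]
        cases hb : (lt.zip qt).any (fun p => match p.2 with | some v => decide (p.1 ≠ v) | none => false) with
        | true => simp
        | false => simp
      | some v =>
        by_cases hlv : l = v
        · subst hlv
          simp only [compare_tuples_alt, ih qt h', List.zip_cons_cons, List.any_cons,
            List.filterMap_cons]
          rw [show (decide ¬l = l) = false by simp, Bool.false_or]
          simp
        · simp [compare_tuples_alt, hlv]

-- ===== VERDICT (by name: the statement is the Claim_ definition above) =====
theorem compare_tuples_spec : Claim_equal_compare_tuples := by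
  intro left query _ hpre
  unfold Spec_compare_tuples compare_tuples
  rw [compareTuplesLoopA_eq, compare_tuples_alt_eq left query hpre]
  simp
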